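-- pv_equiv track=rewrite | github.com/nickxu2406-SGP/AllegroSupport | scripts/fetch_180days_graph_api.py | group_by_conversation
-- ===== SOURCE A (Python) =====
-- from collections import defaultdict
-- from typing import List, Dict, Any, Optional
--
-- def group_by_conversation(emails: List[Dict]) -> Dict:
--     """按会话分组"""
--     conversations = defaultdict(list)
--     for email in emails:
--         topic = email.get('conversation_id') or email['subject']
--         conversations[topic].append(email)
--
--     # 按时间排序
--     for topic in conversations:
--         conversations[topic].sort(key=lambda x: x['received_time'])
--
--     return dict(conversations)
-- ===== SOURCE B (Python) =====
-- def group_by_conversation(emails):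
--     """Group by conversation: one stable global sort by received_time, then a single grouping pass."""
--     keyed = [(email.get('conversation_id') or email['subject'], email) for email in emails]
--     groups = {topic: [] for topic, _ in keyed}
--     for topic, email in sorted(keyed, key=lambda p: p[1]['received_time']):
--         groups[topic].append(email)
--     return groups
-- ===== Notes on version B (the rewrite author's own statement) =====
-- stated objective: alternative
-- what changed: Instead of grouping into a defaultdict and then sorting each group separately, B does one stable global sort of (topic, email) pairs by received_time and a single grouping pass; stability makes each group come out sorted with A's exact tie order, and a key-set comprehension preserves A's first-appearance key order.
import Mathlib
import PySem

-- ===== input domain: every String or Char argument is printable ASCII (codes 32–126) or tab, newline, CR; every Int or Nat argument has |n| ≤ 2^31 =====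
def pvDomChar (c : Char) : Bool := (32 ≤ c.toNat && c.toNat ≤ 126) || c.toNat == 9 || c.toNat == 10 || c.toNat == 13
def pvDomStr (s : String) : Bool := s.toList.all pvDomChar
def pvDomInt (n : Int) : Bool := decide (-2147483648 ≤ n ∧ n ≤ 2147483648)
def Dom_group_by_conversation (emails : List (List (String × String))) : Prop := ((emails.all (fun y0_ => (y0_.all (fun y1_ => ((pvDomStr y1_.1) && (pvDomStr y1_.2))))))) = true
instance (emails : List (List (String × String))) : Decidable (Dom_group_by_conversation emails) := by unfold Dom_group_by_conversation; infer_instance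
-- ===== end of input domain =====

-- B replaces A's per-group sorts by ONE stable global sort by received_time followed by a single
-- grouping pass (stability makes each group come out sorted); same return value, no speed claim.

-- shared expression helpers (both Pythons compute the topic and the sort key by the same expression)
-- topic = email.get('conversation_id') or email['subject']   (total form: '' where Python raises; Pre_ excludes that)
def pvTopic (e : List (String × String)) : String :=
  match (PySem.Dict.mk e).get? "conversation_id" with
  | some c => if c = "" then (PySem.Dict.mk e).getD "subject" "" else c
  | none => (PySem.Dict.mk e).getD "subject" ""

-- x['received_time']   (total form: '' where Python raises; Pre_ excludes that)
def pvRT (e : List (String × String)) : String := (PySem.Dict.mk e).getD "received_time" ""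

-- ===== PORT A =====
def group_by_conversation (emails : List (List (String × String))) : List (String × List (List (String × String))) :=
  -- conversations = defaultdict(list); for email: conversations[topic].append(email)
  let conversations : PySem.Dict String (List (List (String × String))) :=
    emails.foldl (fun d e => d.modify (pvTopic e) [] (fun l => l ++ [e])) PySem.Dict.empty
  -- for topic in conversations: conversations[topic].sort(key=lambda x: x['received_time']); return dict(conversations)
  conversations.items.map (fun p => (p.1, PySem.List.sorted p.2 pvRT))

-- ===== PORT B =====
def group_by_conversation_alt (emails : List (List (String × String))) : List (String × List (List (String × String))) :=
  -- keyed = [(topic, email) for email in emails]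
  let keyed : List (String × List (String × String)) := emails.map (fun e => (pvTopic e, e))
  -- groups = {topic: [] for topic, _ in keyed}
  let groups : PySem.Dict String (List (List (String × String))) :=
    keyed.foldl (fun d p => d.insert p.1 []) PySem.Dict.empty
  -- for topic, email in sorted(keyed, key=lambda p: p[1]['received_time']): groups[topic].append(email)
  -- (the key is always present in groups, so groups[topic].append is modify with default [])
  (PySem.List.sorted keyed (fun p => pvRT p.2)).foldl
    (fun d p => d.modify p.1 [] (fun l => l ++ [p.2])) groups
  |>.items

-- ===== PRECONDITION & SPEC =====
-- Exactly where A returns: every email has a 'received_time' key (the sort key raises KeyError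
-- otherwise) and, when 'conversation_id' is missing or empty, a 'subject' key (else email['subject'] raises).
def Pre_group_by_conversation (emails : List (List (String × String))) : Prop :=
  (emails.all (fun e =>
    (PySem.Dict.mk e).contains "received_time" &&
    (!((PySem.Dict.mk e).getD "conversation_id" "" == "") || (PySem.Dict.mk e).contains "subject"))) = true
instance (emails : List (List (String × String))) : Decidable (Pre_group_by_conversation emails) := by unfold Pre_group_by_conversation; infer_instance
def pvWitness_group_by_conversation : (List (List (String × String))) :=
  [[("subject", "hi"), ("received_time", "2024-01-02")], [("conversation_id", "c1"), ("received_time", "2024-01-01")]]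

def Spec_group_by_conversation (emails : List (List (String × String))) (out : List (String × List (List (String × String)))) : Prop := out = group_by_conversation_alt emails
instance (emails : List (List (String × String))) (out : List (String × List (List (String × String)))) : Decidable (Spec_group_by_conversation emails out) := by unfold Spec_group_by_conversation; infer_instance

-- ===== CLAIM (what is proved, stated in full; the proofs are below) =====
def Claim_equal_group_by_conversation : Prop := ∀ (emails : List (List (String × String))), Dom_group_by_conversation emails → Pre_group_by_conversation emails → Spec_group_by_conversation emails (group_by_conversation emails)

-- ===== LEMMAS AND PROOFS =====

-- insertBy maps along f when the comparison factors through f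
theorem map_insertBy {α β : Type} (f : α → β) (bf : α → α → Bool) (bg : β → β → Bool)
    (h : ∀ a b, bf a b = bg (f a) (f b)) (x : α) (ys : List α) :
    (PySem.List.insertBy bf x ys).map f = PySem.List.insertBy bg (f x) (ys.map f) := by
  induction ys with
  | nil => simp [PySem.List.insertBy]
  | cons y t ih =>
    simp only [PySem.List.insertBy, List.map_cons, h x y]
    by_cases hb : bg (f x) (f y) = true <;> simp [hb, ih]

-- sorting a mapped list is mapping the sort under the composed key
theorem sorted_map_factor {α β κ : Type} [LinearOrder κ] (f : α → β) (key : β → κ) (l : List α) :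
    PySem.List.sorted (l.map f) key = (PySem.List.sorted l (fun a => key (f a))).map f := by
  rw [PySem.List.sorted_eq_foldl_insertBy, PySem.List.sorted_eq_foldl_insertBy, List.foldl_map]
  suffices h : ∀ (l : List α) (acc : List α),
      List.foldl (fun acc x => PySem.List.insertBy (fun a b => decide (key a < key b)) (f x) acc) (acc.map f) l
        = (List.foldl (fun acc x => PySem.List.insertBy (fun a b => decide (key (f a) < key (f b))) x acc) acc l).map f by
    simpa using h l []
  intro l
  induction l with
  | nil => intro acc; simp
  | cons x t ih =>
    intro acc
    simp only [List.foldl_cons]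
    rw [← map_insertBy f _ _ (fun a b => rfl) x acc, ih]

-- insertBy goes to the front when x compares before every element
theorem insertBy_eq_cons_of_forall {α : Type} (before : α → α → Bool) (x : α) (zs : List α)
    (h : ∀ z ∈ zs, before x z = true) : PySem.List.insertBy before x zs = x :: zs := by
  cases zs with
  | nil => rfl
  | cons z t => simp [PySem.List.insertBy, h z (by simp)]

-- insertBy preserves the sortedness invariant
theorem pairwise_insertBy {α κ : Type} [LinearOrder κ] (key : α → κ) (x : α) (ys : List α)
    (h : ys.Pairwise (fun a b => key a ≤ key b)) :
    (PySem.List.insertBy (fun a b => decide (key a < key b)) x ys).Pairwise (fun a b => key a ≤ key b) := by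
  induction ys with
  | nil => simp [PySem.List.insertBy]
  | cons y t ih =>
    rcases List.pairwise_cons.mp h with ⟨hy, ht⟩
    by_cases hb : key x < key y
    · simp only [PySem.List.insertBy, hb, decide_true, if_true]
      refine List.pairwise_cons.mpr ⟨?_, h⟩
      intro z hz
      rcases List.mem_cons.mp hz with rfl | hz
      · exact le_of_lt hb
      · exact le_trans (le_of_lt hb) (hy z hz)
    · simp only [PySem.List.insertBy, hb, decide_false, Bool.false_eq_true, if_false]
      refine List.pairwise_cons.mpr ⟨?_, ih ht⟩
      intro z hz
      rcases (PySem.List.mem_insertBy _ _ _ _).mp hz with hz | hz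
      · exact hz ▸ le_of_not_gt hb
      · exact hy z hz

-- on a sorted list, filter commutes with insertBy
theorem filter_insertBy {α κ : Type} [LinearOrder κ] (key : α → κ) (p : α → Bool) (x : α) (ys : List α)
    (h : ys.Pairwise (fun a b => key a ≤ key b)) :
    (PySem.List.insertBy (fun a b => decide (key a < key b)) x ys).filter p =
      if p x then PySem.List.insertBy (fun a b => decide (key a < key b)) x (ys.filter p) else ys.filter p := by
  induction ys with
  | nil =>
    by_cases hp : p x = true <;> simp [PySem.List.insertBy, hp]
  | cons y t ih =>
    rcases List.pairwise_cons.mp h with ⟨hy, ht⟩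
    by_cases hb : key x < key y
    · simp only [PySem.List.insertBy, hb, decide_true, if_true]
      by_cases hp : p x = true
      · rw [List.filter_cons_of_pos hp]
        rw [if_pos hp]
        rw [insertBy_eq_cons_of_forall]
        intro z hz
        have hz' : z ∈ y :: t := List.mem_of_mem_filter hz
        rcases List.mem_cons.mp hz' with rfl | hz'
        · simpa using hb
        · simpa using lt_of_lt_of_le hb (hy z hz')
      · simp only [Bool.not_eq_true] at hp
        rw [List.filter_cons_of_neg (by simp [hp]), if_neg (by simp [hp])]
    · simp only [PySem.List.insertBy, hb, decide_false, Bool.false_eq_true, if_false]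
      by_cases hpy : p y = true
      · rw [List.filter_cons_of_pos hpy, List.filter_cons_of_pos hpy, ih ht]
        by_cases hp : p x = true
        · rw [if_pos hp, if_pos hp]
          simp [PySem.List.insertBy, hb]
        · simp only [Bool.not_eq_true] at hp
          rw [if_neg (by simp [hp]), if_neg (by simp [hp])]
      · simp only [Bool.not_eq_true] at hpy
        rw [List.filter_cons_of_neg (by simp [hpy]), List.filter_cons_of_neg (by simp [hpy]), ih ht]

-- the insertion-sort fold commutes with filter from a sorted accumulator
theorem foldl_insertBy_filter {α κ : Type} [LinearOrder κ] (key : α → κ) (p : α → Bool) :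
    ∀ (l acc : List α), acc.Pairwise (fun a b => key a ≤ key b) →
      (List.foldl (fun acc x => PySem.List.insertBy (fun a b => decide (key a < key b)) x acc) acc l).filter p =
        List.foldl (fun acc x => PySem.List.insertBy (fun a b => decide (key a < key b)) x acc) (acc.filter p) (l.filter p) := by
  intro l
  induction l with
  | nil => intro acc _; simp
  | cons x t ih =>
    intro acc hacc
    simp only [List.foldl_cons]
    rw [ih _ (pairwise_insertBy key x acc hacc), filter_insertBy key p x acc hacc]
    by_cases hp : p x = true
    · rw [List.filter_cons_of_pos hp, if_pos hp, List.foldl_cons]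
    · simp only [Bool.not_eq_true] at hp
      rw [List.filter_cons_of_neg (by simp [hp]), if_neg (by simp [hp])]

-- STABILITY: filtering a stable sort is sorting the filtered list
theorem sorted_filter {α κ : Type} [LinearOrder κ] (key : α → κ) (p : α → Bool) (l : List α) :
    (PySem.List.sorted l key).filter p = PySem.List.sorted (l.filter p) key := by
  rw [PySem.List.sorted_eq_foldl_insertBy, PySem.List.sorted_eq_foldl_insertBy]
  simpa using foldl_insertBy_filter key p l [] (by simp)

-- a fold inserting only [] leaves every getD _ [] at []
theorem getD_foldl_insert_nil {κ β : Type} [BEq κ] [LawfulBEq κ] [DecidableEq κ] :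
    ∀ (l : List (κ × β)) (d : PySem.Dict κ (List β)), (∀ k, d.getD k [] = []) →
      ∀ k, (List.foldl (fun d p => d.insert p.1 ([] : List β)) d l).getD k [] = [] := by
  intro l
  induction l with
  | nil => intro d hd k; exact hd k
  | cons x t ih =>
    intro d hd k
    simp only [List.foldl_cons]
    refine ih _ (fun k' => ?_) k
    rw [PySem.Dict.getD_insert]
    split <;> simp [hd]

-- Set.update by elements already present is the identity
theorem set_update_eq_self {α : Type} [BEq α] [LawfulBEq α] :
    ∀ (l : List α) (s : PySem.Set α), (∀ x ∈ l, x ∈ s) → PySem.Set.update s l = s := by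
  intro l
  induction l with
  | nil => intro s _; rfl
  | cons x t ih =>
    intro s hs
    have hx : PySem.Set.add s x = s := by
      simp [PySem.Set.add, PySem.Set.contains, hs x (by simp)]
    show PySem.Set.update (PySem.Set.add s x) t = s
    rw [hx]
    exact ih s (fun y hy => hs y (by simp [hy]))

-- ===== VERDICT (by name: the statement is the Claim_ definition above) =====
theorem group_by_conversation_spec : Claim_equal_group_by_conversation := by
  intro emails _ _
  unfold Spec_group_by_conversation group_by_conversation group_by_conversation_alt
  dsimp only
  set keyed : List (String × List (String × String)) := emails.map (fun e => (pvTopic e, e)) with hkeyed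
  set K : List String := PySem.Set.ofList (emails.map pvTopic) with hK
  have hmapfst : keyed.map Prod.fst = emails.map pvTopic := by
    simp [hkeyed, Function.comp]
  -- A side
  have hfoldA : emails.foldl (fun d e => d.modify (pvTopic e) [] (fun l => l ++ [e])) PySem.Dict.empty
      = keyed.foldl (fun d p => d.modify p.1 [] (fun l => l ++ [p.2])) PySem.Dict.empty := by
    rw [hkeyed, List.foldl_map]
  have hkeysA : (keyed.foldl (fun d p => d.modify p.1 [] (fun l => l ++ [p.2])) PySem.Dict.empty).keys = K := by
    rw [PySem.Dict.keys_foldl_modify_key keyed Prod.fst [] (fun _ p => fun l => l ++ [p.2])]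
    rw [PySem.Dict.keys_empty, hmapfst, hK, PySem.Set.ofList_eq_foldl]
    rfl
  have hnodupA : (keyed.foldl (fun d p => d.modify p.1 [] (fun l => l ++ [p.2])) PySem.Dict.empty).keys.Nodup := by
    exact PySem.Dict.nodup_keys_foldl_modify_key keyed Prod.fst [] (fun _ p => fun l => l ++ [p.2]) _ (by simp)
  have hA : (emails.foldl (fun d e => d.modify (pvTopic e) [] (fun l => l ++ [e])) PySem.Dict.empty).items
      = K.map (fun k => (k, (keyed.filter (fun p => p.1 == k)).map (fun p => p.2))) := by
    rw [hfoldA, PySem.Dict.items_eq_map_keys _ hnodupA [], hkeysA]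
    refine List.map_congr_left (fun k _ => ?_)
    rw [PySem.Dict.getD_foldl_modify_append]
    simp
  -- B side
  have hkeysB : (keyed.foldl (fun d p => d.insert p.1 ([] : List (List (String × String)))) PySem.Dict.empty).keys = K := by
    rw [PySem.Dict.keys_foldl_insert_key keyed Prod.fst (fun _ _ => [])]
    rw [PySem.Dict.keys_empty, hmapfst, hK, PySem.Set.ofList_eq_foldl]
    rfl
  set groups := keyed.foldl (fun d p => d.insert p.1 ([] : List (List (String × String)))) PySem.Dict.empty with hgroups
  set sk := PySem.List.sorted keyed (fun p => pvRT p.2) with hsk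
  have hskmem : ∀ x ∈ sk.map Prod.fst, x ∈ K := by
    intro x hx
    rcases List.mem_map.mp hx with ⟨q, hq, rfl⟩
    have : q ∈ keyed := (PySem.List.mem_sorted _ _ _ _).mp hq
    have : q.1 ∈ keyed.map Prod.fst := List.mem_map_of_mem this
    rw [hmapfst] at this
    exact (PySem.Set.mem_ofList _ _).mpr this
  have hkeysF : ((sk.foldl (fun d p => d.modify p.1 [] (fun l => l ++ [p.2])) groups)).keys = K := by
    rw [PySem.Dict.keys_foldl_modify_key sk Prod.fst [] (fun _ p => fun l => l ++ [p.2]), hkeysB]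
    exact set_update_eq_self _ _ hskmem
  have hnodupF : ((sk.foldl (fun d p => d.modify p.1 [] (fun l => l ++ [p.2])) groups)).keys.Nodup := by
    rw [hkeysF, hK]
    exact PySem.Set.nodup_ofList _
  have hB : (sk.foldl (fun d p => d.modify p.1 [] (fun l => l ++ [p.2])) groups).items
      = K.map (fun k => (k, (sk.filter (fun p => p.1 == k)).map (fun p => p.2))) := by
    rw [PySem.Dict.items_eq_map_keys _ hnodupF [], hkeysF]
    refine List.map_congr_left (fun k _ => ?_)
    rw [PySem.Dict.getD_foldl_modify_append]
    rw [getD_foldl_insert_nil keyed PySem.Dict.empty (fun k => by simp) k]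
    simp
  rw [hA, hB, List.map_map]
  refine List.map_congr_left (fun k _ => ?_)
  simp only [Function.comp]
  refine congrArg (fun v => (k, v)) ?_
  -- per-group: sort of the filtered group = filtered global stable sort
  rw [hsk, sorted_filter (fun p => pvRT p.2) (fun p => p.1 == k) keyed]
  rw [sorted_map_factor Prod.snd pvRT (keyed.filter (fun p => p.1 == k))]
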